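-- pv_equiv track=rewrite | github.com/hal9000universe/gauss | src/main.py | format_decoding
-- ===== SOURCE A (Python) =====
-- def format_decoding(decoding: str) -> str:
--     for i in range(0, 10):
--         decoding = decoding.replace(f"{i} ", f"{i}")
--     decoding = decoding.replace(". ", ".")
--     decoding = decoding.replace("( ", "(")
--     decoding = decoding.replace("- ", "-")
--     decoding = decoding.replace(", ", ",")
--     return decoding
-- ===== SOURCE B (Python) =====
-- def format_decoding(decoding: str) -> str:
--     triggers = set("0123456789.(-,")
--     out = []
--     prev = None
--     for ch in decoding:
--         if not (ch == ' ' and prev is not None and prev in triggers):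
--             out.append(ch)
--         prev = ch
--     return "".join(out)
-- ===== Notes on version B (the rewrite author's own statement) =====
-- stated objective: simpler
-- what changed: Replaces A's fourteen sequential str.replace passes over the whole string by a single left-to-right scan that drops a space exactly when the original preceding character is a digit or one of the four trigger punctuation marks.
import Mathlib
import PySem

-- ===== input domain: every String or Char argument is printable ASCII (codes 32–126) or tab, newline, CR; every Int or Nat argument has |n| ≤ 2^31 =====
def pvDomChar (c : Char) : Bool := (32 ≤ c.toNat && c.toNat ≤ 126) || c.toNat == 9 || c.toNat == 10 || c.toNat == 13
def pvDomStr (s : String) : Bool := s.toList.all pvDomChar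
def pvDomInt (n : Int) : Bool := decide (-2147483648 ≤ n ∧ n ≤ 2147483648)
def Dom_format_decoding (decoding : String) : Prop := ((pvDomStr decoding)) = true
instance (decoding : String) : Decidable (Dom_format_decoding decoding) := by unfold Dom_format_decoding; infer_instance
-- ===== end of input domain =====

-- B replaces A's fourteen sequential replace passes by one left-to-right scan that drops each
-- space whose original predecessor is a trigger character; objective: simpler (same results).

-- ===== PORT A =====
def format_decoding (decoding : String) : String :=
  let d1 := (PySem.List.pyRange 0 10 1).foldl
      (fun d i => PySem.Str.replace d (PySem.Int.toStr i ++ " ") (PySem.Int.toStr i)) decoding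
  let d2 := PySem.Str.replace d1 ". " "."
  let d3 := PySem.Str.replace d2 "( " "("
  let d4 := PySem.Str.replace d3 "- " "-"
  PySem.Str.replace d4 ", " ","

-- ===== PORT B =====
def pvTriggers : PySem.Set Char := PySem.Set.ofList "0123456789.(-,".toList

def format_decoding_alt (decoding : String) : String :=
  String.ofList
    ((decoding.toList.foldl
      (fun (st : List Char × Option Char) ch =>
        if ch == ' ' && st.2.elim false (fun p => pvTriggers.contains p) then (st.1, some ch)
        else (st.1 ++ [ch], some ch))
      ([], none)).1)

-- ===== PRECONDITION & SPEC =====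
def Spec_format_decoding (decoding : String) (out : String) : Prop := out = format_decoding_alt decoding
instance (decoding : String) (out : String) : Decidable (Spec_format_decoding decoding out) := by unfold Spec_format_decoding; infer_instance

-- ===== CLAIM (what is proved, stated in full; the proofs are below) =====
def Claim_equal_format_decoding : Prop := ∀ (decoding : String), Dom_format_decoding decoding → Spec_format_decoding decoding (format_decoding decoding)

-- ===== LEMMAS AND PROOFS =====

/-- What one pass `s.replace (c + " ") c` computes, as a structural recursion. -/
def repP (c : Char) : List Char → List Char
  | [] => []
  | [a] => [a]
  | a :: b :: t => if a = c ∧ b = ' ' then a :: repP c t else a :: repP c (b :: t)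

/-- One-pass space removal with the ORIGINAL predecessor `prev` as context (B's loop body). -/
def fD (S : List Char) : Char → List Char → List Char
  | _, [] => []
  | prev, b :: r => if b = ' ' ∧ prev ∈ S then fD S b r else b :: fD S b r

theorem repP_cons (c a : Char) (t : List Char) (h : ¬(a = c ∧ t.head? = some ' ')) :
    repP c (a :: t) = a :: repP c t := by
  cases t with
  | nil => rfl
  | cons b t' => simp only [repP, List.head?_cons] at h ⊢; rw [if_neg (by simpa using h)]

theorem fD_nil (prev : Char) (l : List Char) : fD [] prev l = l := by
  induction l generalizing prev with
  | nil => rfl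
  | cons b r ih => simp [fD, ih]

theorem go_pair (c : Char) : ∀ (fuel : Nat) (l acc : List Char), l.length ≤ fuel →
    PySem.Chars.replace.go [c, ' '] [c] fuel l acc = acc.reverse ++ repP c l := by
  intro fuel
  induction fuel with
  | zero =>
    intro l acc h
    have hl : l = [] := by cases l <;> simp_all
    subst hl
    simp [PySem.Chars.replace.go, repP]
  | succ n ih =>
    intro l acc h
    cases l with
    | nil => simp [PySem.Chars.replace.go, repP]
    | cons a t =>
      cases t with
      | nil =>
        have hp : ([c, ' '].isPrefixOf [a]) = false := by simp [List.isPrefixOf]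
        rw [PySem.Chars.replace.go]
        simp only [hp, Bool.false_eq_true, if_false]
        rw [ih [] (a :: acc) (by simp)]
        simp [repP]
      | cons b t' =>
        by_cases hab : a = c ∧ b = ' '
        · obtain ⟨ha, hb⟩ := hab
          subst ha hb
          have hp : ([a, ' '].isPrefixOf (a :: ' ' :: t')) = true := by simp [List.isPrefixOf]
          rw [PySem.Chars.replace.go]
          simp only [hp, if_true]
          rw [show List.drop [a,' '].length (a :: ' ' :: t') = t' from rfl]
          rw [ih t' ([a].reverse ++ acc) (by simp at h ⊢; omega)]
          simp [repP]
        · have hp : ([c, ' '].isPrefixOf (a :: b :: t')) = false := by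
            simp [List.isPrefixOf]
            intro h1 h2; exact absurd ⟨h1.symm, h2.symm⟩ hab
          rw [PySem.Chars.replace.go]
          simp only [hp, Bool.false_eq_true, if_false]
          rw [ih (b :: t') (a :: acc) (by simp at h ⊢; omega)]
          simp [repP, if_neg hab]


theorem replace_pair (c : Char) (l : List Char) :
    PySem.Chars.replace l [c, ' '] [c] = repP c l := by
  simp only [PySem.Chars.replace, List.isEmpty_cons, if_false, Bool.false_eq_true]
  simpa using go_pair c l.length l [] le_rfl

theorem stepK (c : Char) (S : List Char) (hc : c ≠ ' ') (hcS : c ∉ S) :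
    ∀ (n : Nat) (l : List Char) (prev : Char), l.length ≤ n →
    ¬(prev = c ∧ l.head? = some ' ') →
    repP c (fD S prev l) = fD (S ++ [c]) prev l := by
  intro n
  induction n with
  | zero =>
    intro l prev h _
    have hl : l = [] := by cases l <;> simp_all
    subst hl; simp [fD, repP]
  | succ n ih =>
    intro l prev hlen hcond
    cases l with
    | nil => simp [fD, repP]
    | cons b r =>
      by_cases hd : b = ' ' ∧ prev ∈ S
      · rw [show fD S prev (b :: r) = fD S b r from by rw [fD, if_pos hd]]
        rw [show fD (S ++ [c]) prev (b :: r) = fD (S ++ [c]) b r from by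
          rw [fD, if_pos ⟨hd.1, by simp [hd.2]⟩]]
        exact ih r b (by simpa using Nat.le_of_succ_le_succ (by simpa using hlen))
          (fun hh => hc (hd.1 ▸ hh.1.symm))
      · have hkeepS : fD S prev (b :: r) = b :: fD S b r := by rw [fD, if_neg hd]
        by_cases hbs : b = ' '
        · have hpc : prev ≠ c := fun h => hcond ⟨h, by simp [hbs]⟩
          have hpS : prev ∉ S := fun h => hd ⟨hbs, h⟩
          have hkeepS' : fD (S ++ [c]) prev (b :: r) = b :: fD (S ++ [c]) b r := by
            rw [fD, if_neg (by simp [hpS]; intro _ hp; exact hpc hp)]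
          rw [hkeepS, hkeepS', repP_cons c b _ (fun hh => hc (hbs ▸ hh.1.symm))]
          exact congrArg (b :: ·) (ih r b (by simpa using Nat.le_of_succ_le_succ (by simpa using hlen))
            (fun hh => hc (hbs ▸ hh.1.symm)))
        · have hkeepS' : fD (S ++ [c]) prev (b :: r) = b :: fD (S ++ [c]) b r := by
            rw [fD, if_neg (fun hh => hbs hh.1)]
          rw [hkeepS, hkeepS']
          by_cases hbc : b = c
          · subst hbc
            cases r with
            | nil => simp [fD, repP]
            | cons b2 r2 =>
              have hin : fD S b (b2 :: r2) = b2 :: fD S b2 r2 := by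
                rw [fD, if_neg (fun hh => hcS hh.2)]
              by_cases hb2 : b2 = ' '
              · subst hb2
                rw [hin]
                have hin' : fD (S ++ [b]) b (' ' :: r2) = fD (S ++ [b]) ' ' r2 := by
                  rw [fD, if_pos ⟨rfl, by simp⟩]
                rw [hin', show repP b (b :: ' ' :: fD S ' ' r2) = b :: repP b (fD S ' ' r2) from by
                  simp [repP]]
                exact congrArg (b :: ·) (ih r2 ' '
                  (by simp at hlen ⊢; omega) (fun hh => hc hh.1.symm))
              · rw [hin, show repP b (b :: b2 :: fD S b2 r2) = b :: repP b (b2 :: fD S b2 r2) from by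
                  simp only [repP]; rw [if_neg (fun hh => hb2 hh.2)]]
                rw [← hin]
                exact congrArg (b :: ·) (ih (b2 :: r2) b
                  (by simpa using Nat.le_of_succ_le_succ (by simpa using hlen))
                  (fun hh => hb2 (by simpa using hh.2)))
          · rw [repP_cons c b _ (fun hh => hbc hh.1)]
            exact congrArg (b :: ·) (ih r b (by simpa using Nat.le_of_succ_le_succ (by simpa using hlen))
              (fun hh => hbc hh.1))

theorem fold_spec (l : List Char) : ∀ (acc : List Char) (p : Char),
    ((l.foldl
      (fun (st : List Char × Option Char) ch =>
        if ch == ' ' && st.2.elim false (fun q => pvTriggers.contains q) then (st.1, some ch)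
        else (st.1 ++ [ch], some ch))
      (acc, some p)).1) = acc ++ fD pvTriggers p l := by
  induction l with
  | nil => intro acc p; simp [fD]
  | cons ch r ih =>
    intro acc p
    by_cases hm : ch = ' ' ∧ p ∈ pvTriggers
    · rw [List.foldl_cons, show (if (ch == ' ' && (some p).elim false (fun q => pvTriggers.contains q)) = true
          then (acc, some ch) else (acc ++ [ch], some ch)) = (acc, some ch) from by
        simp [hm.1, hm.2]]
      rw [ih acc ch, show fD pvTriggers p (ch :: r) = fD pvTriggers ch r from by rw [fD, if_pos hm]]
    · rw [List.foldl_cons, show (if (ch == ' ' && (some p).elim false (fun q => pvTriggers.contains q)) = true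
          then (acc, some ch) else (acc ++ [ch], some ch)) = (acc ++ [ch], some ch) from by
        by_cases h1 : ch = ' '
        · have h2 : p ∉ pvTriggers := fun h => hm ⟨h1, h⟩
          simp [h1, h2]
        · simp [h1]]
      rw [ih (acc ++ [ch]) ch, show fD pvTriggers p (ch :: r) = ch :: fD pvTriggers ch r from by
        rw [fD, if_neg hm]]
      simp

theorem alt_chars (s : String) :
    format_decoding_alt s = String.ofList (fD pvTriggers 'x' s.toList) := by
  unfold format_decoding_alt
  cases h : s.toList with
  | nil => simp [fD]
  | cons a r =>
    rw [List.foldl_cons]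
    rw [show (if (a == ' ' && (Option.elim (none : Option Char) false (fun q => pvTriggers.contains q)))
        = true then (([] : List Char), some a) else (([] : List Char) ++ [a], some a))
        = ([a], some a) from by simp]
    rw [fold_spec r [a] a]
    rw [show fD pvTriggers 'x' (a :: r) = a :: fD pvTriggers a r from by
      rw [fD, if_neg (fun hh => by have := hh.2; revert this; decide)]]
    simp


theorem a_chars (s : String) :
    (format_decoding s).toList =
      repP ',' (repP '-' (repP '(' (repP '.' (repP '9' (repP '8' (repP '7' (repP '6'
        (repP '5' (repP '4' (repP '3' (repP '2' (repP '1' (repP '0' s.toList))))))))))))) := by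
  have hr : PySem.List.pyRange 0 10 1 = [0,1,2,3,4,5,6,7,8,9] := by decide
  have hn0 : (PySem.Int.toStr 0 ++ " ").toList = ['0', ' '] := by decide
  have hm0 : (PySem.Int.toStr 0).toList = ['0'] := by decide
  have hn1 : (PySem.Int.toStr 1 ++ " ").toList = ['1', ' '] := by decide
  have hm1 : (PySem.Int.toStr 1).toList = ['1'] := by decide
  have hn2 : (PySem.Int.toStr 2 ++ " ").toList = ['2', ' '] := by decide
  have hm2 : (PySem.Int.toStr 2).toList = ['2'] := by decide
  have hn3 : (PySem.Int.toStr 3 ++ " ").toList = ['3', ' '] := by decide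
  have hm3 : (PySem.Int.toStr 3).toList = ['3'] := by decide
  have hn4 : (PySem.Int.toStr 4 ++ " ").toList = ['4', ' '] := by decide
  have hm4 : (PySem.Int.toStr 4).toList = ['4'] := by decide
  have hn5 : (PySem.Int.toStr 5 ++ " ").toList = ['5', ' '] := by decide
  have hm5 : (PySem.Int.toStr 5).toList = ['5'] := by decide
  have hn6 : (PySem.Int.toStr 6 ++ " ").toList = ['6', ' '] := by decide
  have hm6 : (PySem.Int.toStr 6).toList = ['6'] := by decide
  have hn7 : (PySem.Int.toStr 7 ++ " ").toList = ['7', ' '] := by decide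
  have hm7 : (PySem.Int.toStr 7).toList = ['7'] := by decide
  have hn8 : (PySem.Int.toStr 8 ++ " ").toList = ['8', ' '] := by decide
  have hm8 : (PySem.Int.toStr 8).toList = ['8'] := by decide
  have hn9 : (PySem.Int.toStr 9 ++ " ").toList = ['9', ' '] := by decide
  have hm9 : (PySem.Int.toStr 9).toList = ['9'] := by decide
  have p1 : (". " : String).toList = ['.', ' '] := by decide
  have p1' : ("." : String).toList = ['.'] := by decide
  have p2 : ("( " : String).toList = ['(', ' '] := by decide
  have p2' : ("(" : String).toList = ['('] := by decide
  have p3 : ("- " : String).toList = ['-', ' '] := by decide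
  have p3' : ("-" : String).toList = ['-'] := by decide
  have p4 : (", " : String).toList = [',', ' '] := by decide
  have p4' : ("," : String).toList = [','] := by decide
  simp only [format_decoding, hr, List.foldl_cons, List.foldl_nil, PySem.Str.toList_replace,
    hn0, hm0, hn1, hm1, hn2, hm2, hn3, hm3, hn4, hm4, hn5, hm5, hn6, hm6, hn7, hm7, hn8, hm8, hn9, hm9, p1, p1', p2, p2', p3, p3', p4, p4', replace_pair]

-- ===== VERDICT (by name: the statement is the Claim_ definition above) =====
theorem format_decoding_spec : Claim_equal_format_decoding := by
  intro s _
  unfold Spec_format_decoding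
  rw [← String.toList_inj, a_chars, alt_chars, String.toList_ofList]
  have e0 : ∀ l : List Char, repP '0' l = fD ['0'] 'x' l := fun l => by
    simpa [fD_nil] using stepK '0' [] (by decide) (by decide) l.length l 'x' le_rfl
      (fun hh => absurd hh.1 (by decide))
  have e1 : ∀ l : List Char, repP '1' (fD ['0'] 'x' l) = fD ['0', '1'] 'x' l := fun l => by
    simpa using stepK '1' ['0'] (by decide) (by decide) l.length l 'x' le_rfl
      (fun hh => absurd hh.1 (by decide))
  have e2 : ∀ l : List Char, repP '2' (fD ['0', '1'] 'x' l) = fD ['0', '1', '2'] 'x' l := fun l => by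
    simpa using stepK '2' ['0', '1'] (by decide) (by decide) l.length l 'x' le_rfl
      (fun hh => absurd hh.1 (by decide))
  have e3 : ∀ l : List Char, repP '3' (fD ['0', '1', '2'] 'x' l) = fD ['0', '1', '2', '3'] 'x' l := fun l => by
    simpa using stepK '3' ['0', '1', '2'] (by decide) (by decide) l.length l 'x' le_rfl
      (fun hh => absurd hh.1 (by decide))
  have e4 : ∀ l : List Char, repP '4' (fD ['0', '1', '2', '3'] 'x' l) = fD ['0', '1', '2', '3', '4'] 'x' l := fun l => by
    simpa using stepK '4' ['0', '1', '2', '3'] (by decide) (by decide) l.length l 'x' le_rfl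
      (fun hh => absurd hh.1 (by decide))
  have e5 : ∀ l : List Char, repP '5' (fD ['0', '1', '2', '3', '4'] 'x' l) = fD ['0', '1', '2', '3', '4', '5'] 'x' l := fun l => by
    simpa using stepK '5' ['0', '1', '2', '3', '4'] (by decide) (by decide) l.length l 'x' le_rfl
      (fun hh => absurd hh.1 (by decide))
  have e6 : ∀ l : List Char, repP '6' (fD ['0', '1', '2', '3', '4', '5'] 'x' l) = fD ['0', '1', '2', '3', '4', '5', '6'] 'x' l := fun l => by
    simpa using stepK '6' ['0', '1', '2', '3', '4', '5'] (by decide) (by decide) l.length l 'x' le_rfl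
      (fun hh => absurd hh.1 (by decide))
  have e7 : ∀ l : List Char, repP '7' (fD ['0', '1', '2', '3', '4', '5', '6'] 'x' l) = fD ['0', '1', '2', '3', '4', '5', '6', '7'] 'x' l := fun l => by
    simpa using stepK '7' ['0', '1', '2', '3', '4', '5', '6'] (by decide) (by decide) l.length l 'x' le_rfl
      (fun hh => absurd hh.1 (by decide))
  have e8 : ∀ l : List Char, repP '8' (fD ['0', '1', '2', '3', '4', '5', '6', '7'] 'x' l) = fD ['0', '1', '2', '3', '4', '5', '6', '7', '8'] 'x' l := fun l => by
    simpa using stepK '8' ['0', '1', '2', '3', '4', '5', '6', '7'] (by decide) (by decide) l.length l 'x' le_rfl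
      (fun hh => absurd hh.1 (by decide))
  have e9 : ∀ l : List Char, repP '9' (fD ['0', '1', '2', '3', '4', '5', '6', '7', '8'] 'x' l) = fD ['0', '1', '2', '3', '4', '5', '6', '7', '8', '9'] 'x' l := fun l => by
    simpa using stepK '9' ['0', '1', '2', '3', '4', '5', '6', '7', '8'] (by decide) (by decide) l.length l 'x' le_rfl
      (fun hh => absurd hh.1 (by decide))
  have e10 : ∀ l : List Char, repP '.' (fD ['0', '1', '2', '3', '4', '5', '6', '7', '8', '9'] 'x' l) = fD ['0', '1', '2', '3', '4', '5', '6', '7', '8', '9', '.'] 'x' l := fun l => by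
    simpa using stepK '.' ['0', '1', '2', '3', '4', '5', '6', '7', '8', '9'] (by decide) (by decide) l.length l 'x' le_rfl
      (fun hh => absurd hh.1 (by decide))
  have e11 : ∀ l : List Char, repP '(' (fD ['0', '1', '2', '3', '4', '5', '6', '7', '8', '9', '.'] 'x' l) = fD ['0', '1', '2', '3', '4', '5', '6', '7', '8', '9', '.', '('] 'x' l := fun l => by
    simpa using stepK '(' ['0', '1', '2', '3', '4', '5', '6', '7', '8', '9', '.'] (by decide) (by decide) l.length l 'x' le_rfl
      (fun hh => absurd hh.1 (by decide))
  have e12 : ∀ l : List Char, repP '-' (fD ['0', '1', '2', '3', '4', '5', '6', '7', '8', '9', '.', '('] 'x' l) = fD ['0', '1', '2', '3', '4', '5', '6', '7', '8', '9', '.', '(', '-'] 'x' l := fun l => by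
    simpa using stepK '-' ['0', '1', '2', '3', '4', '5', '6', '7', '8', '9', '.', '('] (by decide) (by decide) l.length l 'x' le_rfl
      (fun hh => absurd hh.1 (by decide))
  have e13 : ∀ l : List Char, repP ',' (fD ['0', '1', '2', '3', '4', '5', '6', '7', '8', '9', '.', '(', '-'] 'x' l) = fD ['0', '1', '2', '3', '4', '5', '6', '7', '8', '9', '.', '(', '-', ','] 'x' l := fun l => by
    simpa using stepK ',' ['0', '1', '2', '3', '4', '5', '6', '7', '8', '9', '.', '(', '-'] (by decide) (by decide) l.length l 'x' le_rfl
      (fun hh => absurd hh.1 (by decide))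
  have hT : pvTriggers = ['0', '1', '2', '3', '4', '5', '6', '7', '8', '9', '.', '(', '-', ','] := by decide
  rw [hT]
  simp only [e0, e1, e2, e3, e4, e5, e6, e7, e8, e9, e10, e11, e12, e13]
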